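-- pv_equiv track=rewrite | github.com/kdg-auts/cryptolib | lab work 06 Simple AES implementation/src_sw_simple_aes/modular_multiplication.py | mult4
-- ===== SOURCE A (Python) =====
-- def mult4(x):
--     m = 19 # modulus is fixed: x^4+x+1
--     mul_res = x<<2 # multiply by 4
--     while mul_res >= 16:
--         if mul_res >= (16<<1):
--             mul_res ^= m<<1
--         elif mul_res >= 16:
--             mul_res ^= m
--     return mul_res
-- ===== SOURCE B (Python) =====
-- def mult4(x):
--     # two sequential xtime (shift-and-reduce) steps: the standard AES idiom for *4 in GF(2^4)
--     def double(a):
--         t = a << 1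
--         if t >= 16:
--             t ^= 19
--         return t
--     return double(double(x))
-- ===== Notes on version B (the rewrite author's own statement) =====
-- stated objective: idiomatic
-- what changed: Replaced the shift-by-2-then-reduce while loop (xor with 19<<1 or 19) by two sequential xtime steps (shift by 1, xor 19 on overflow), the standard AES multiply-by-4 decomposition; Pre_ excludes x >= 16, where A's while loop never terminates.
-- outside the precondition, e.g. on mult4(16): A does not finish within the time limit, B returns 117; on mult4(19): A does not finish within the time limit, B returns 121; on mult4(64): A does not finish within the time limit, B returns 309
import Mathlib
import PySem

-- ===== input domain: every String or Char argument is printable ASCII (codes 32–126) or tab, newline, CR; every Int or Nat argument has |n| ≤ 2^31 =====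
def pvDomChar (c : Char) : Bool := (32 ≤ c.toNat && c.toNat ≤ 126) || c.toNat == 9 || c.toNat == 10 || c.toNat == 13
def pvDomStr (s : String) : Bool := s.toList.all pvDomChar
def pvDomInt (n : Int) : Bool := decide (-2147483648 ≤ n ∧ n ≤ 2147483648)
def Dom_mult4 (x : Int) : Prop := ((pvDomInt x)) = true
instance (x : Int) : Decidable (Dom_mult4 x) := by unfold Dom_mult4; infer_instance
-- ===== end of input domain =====

-- B replaces A's combined reduce-after-shift loop by two standard AES xtime steps (idiomatic decomposition).
-- A's while loop never terminates for x ≥ 16; Pre_ excludes exactly those inputs.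

-- ===== PORT A =====
-- the while loop, transliterated with a fuel guard for totality only (2 iterations suffice on Pre_);
-- x<<2 is x*4 and m<<1 is 38, exact for Python ints
def mult4Loop : Nat → Int → Int
  | 0, mul_res => mul_res
  | fuel + 1, mul_res =>
    if mul_res ≥ 16 then
      if mul_res ≥ 32 then mult4Loop fuel (PySem.Int.bxor mul_res 38)
      else mult4Loop fuel (PySem.Int.bxor mul_res 19)
    else mul_res

def mult4 (x : Int) : Int := mult4Loop 64 (x * 4)

-- ===== PORT B =====
-- a<<1 is a*2, exact for Python ints
def pvDouble (a : Int) : Int :=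
  let t := a * 2
  if t ≥ 16 then PySem.Int.bxor t 19 else t

def mult4_alt (x : Int) : Int := pvDouble (pvDouble x)

-- ===== PRECONDITION & SPEC =====
-- Pre_ excludes x ≥ 16: there A's while loop runs forever (mul_res ≥ 64 keeps a high bit that
-- xor with 38/19 never clears), so A returns no value on those inputs.
def Pre_mult4 (x : Int) : Prop := x ≤ 15
instance (x : Int) : Decidable (Pre_mult4 x) := by unfold Pre_mult4; infer_instance
def pvWitness_mult4 : Int := 13
def Spec_mult4 (x : Int) (out : Int) : Prop := out = mult4_alt x
instance (x : Int) (out : Int) : Decidable (Spec_mult4 x out) := by unfold Spec_mult4; infer_instance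

-- ===== CLAIM (what is proved, stated in full; the proofs are below) =====
def Claim_equal_mult4 : Prop := ∀ (x : Int), Dom_mult4 x → Pre_mult4 x → Spec_mult4 x (mult4 x)

-- ===== LEMMAS AND PROOFS =====
theorem mult4_neg (x : Int) (h : x < 0) : mult4 x = mult4_alt x := by
  have h4 : ¬ (x * 4 ≥ 16) := by omega
  have h2 : ¬ (x * 2 ≥ 16) := by omega
  have h22 : ¬ (x * 2 * 2 ≥ 16) := by omega
  simp [mult4, mult4Loop, mult4_alt, pvDouble, h4, h2, h22]
  ring

-- ===== VERDICT (by name: the statement is the Claim_ definition above) =====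
theorem mult4_spec : Claim_equal_mult4 := by
  intro x _ hpre
  unfold Spec_mult4
  rcases lt_or_ge x 0 with h | h
  · exact mult4_neg x h
  · unfold Pre_mult4 at hpre
    interval_cases x <;> decide
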